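-- pv_equiv track=rewrite | github.com/8n8/trumat | rules.py | insert_newlines_before_top_level_bind
-- ===== SOURCE A (Python) =====
-- def insert_newlines_before_top_level_bind(old):
--     new = ""
--     for i, c in enumerate(old):
--         new += c
--
--         if c == "\n":
--             try:
--                 if old[i + 1] != " ":
--                     new += "\n\n"
--
--             except IndexError:
--                 continue
--
--     return new, None
-- ===== SOURCE B (Python) =====
-- def insert_newlines_before_top_level_bind(old):
--     # Split on newlines once; rejoin, widening each newline that is followed
--     # by a non-space character (a following part that is non-empty-and-not-
--     # space-led, or an empty part that is not the final one) to three newlines.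
--     parts = old.split("\n")
--     n = len(parts)
--     new = parts[0]
--     for j in range(1, n):
--         p = parts[j]
--         if p.startswith(" ") or (p == "" and j == n - 1):
--             new += "\n" + p
--         else:
--             new += "\n\n\n" + p
--     return new, None
-- ===== Notes on version B (the rewrite author's own statement) =====
-- stated objective: faster
-- what changed: Replaces the per-character loop with lookahead indexing and IndexError handling by one split on newline plus a rejoin choosing a 1- or 3-newline separator per part boundary.
import Mathlib
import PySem

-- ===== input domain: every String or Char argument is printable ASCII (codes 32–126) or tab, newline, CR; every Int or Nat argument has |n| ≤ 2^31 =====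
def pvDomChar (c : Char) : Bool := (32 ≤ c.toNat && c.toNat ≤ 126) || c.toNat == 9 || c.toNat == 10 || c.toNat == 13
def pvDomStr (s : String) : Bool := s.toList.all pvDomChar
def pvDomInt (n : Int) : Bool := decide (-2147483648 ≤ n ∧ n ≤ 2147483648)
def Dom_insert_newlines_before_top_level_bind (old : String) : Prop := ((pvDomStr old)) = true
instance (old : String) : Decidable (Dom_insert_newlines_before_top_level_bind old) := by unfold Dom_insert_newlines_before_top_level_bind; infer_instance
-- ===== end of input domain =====

-- B replaces A's per-character loop (with lookahead indexing and IndexError handling)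
-- by one split on '\n' plus a rejoin choosing a 1- or 3-newline separator per boundary
-- (objective: faster by a constant factor, measured).

-- ===== PORT A =====
-- the growing string `new` is carried as a List Char and packed with String.ofList at the end
def insert_newlines_before_top_level_bind (old : String) : String × Option String :=
  let new := (PySem.List.enumerate old.toList 0).foldl (fun new ic =>
      let new := new ++ [ic.2]
      if ic.2 = '\n' then
        match PySem.List.pyGet? old.toList (ic.1 + 1) with    -- none = IndexError → continue
        | some d => if d ≠ ' ' then new ++ ['\n', '\n'] else new
        | none => new
      else new) []
  (String.ofList new, none)

-- ===== PORT B =====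
def insert_newlines_before_top_level_bind_alt (old : String) : String × Option String :=
  -- old.split("\n"): the separator is the nonempty literal "\n", so split? is always `some`
  let parts := (PySem.Str.split? old "\n").getD []
  let n : Int := parts.length
  let new := (PySem.List.pyRange 1 n 1).foldl (fun new j =>
      let p := PySem.List.pyGetD parts j ""
      if PySem.Str.startswith p " " || (p == "" && j == n - 1) then
        new ++ '\n' :: p.toList
      else
        new ++ '\n' :: '\n' :: '\n' :: p.toList)
    (PySem.List.pyGetD parts 0 "").toList
  (String.ofList new, none)

-- ===== PRECONDITION & SPEC =====
def Spec_insert_newlines_before_top_level_bind (old : String) (out : String × Option String) : Prop := out = insert_newlines_before_top_level_bind_alt old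
instance (old : String) (out : String × Option String) : Decidable (Spec_insert_newlines_before_top_level_bind old out) := by unfold Spec_insert_newlines_before_top_level_bind; infer_instance

-- ===== CLAIM (what is proved, stated in full; the proofs are below) =====
def Claim_equal_insert_newlines_before_top_level_bind : Prop := ∀ (old : String), Dom_insert_newlines_before_top_level_bind old → Spec_insert_newlines_before_top_level_bind old (insert_newlines_before_top_level_bind old)

-- ===== LEMMAS AND PROOFS =====

-- the common character-level specification of the transformation
def pvF : List Char → List Char
  | [] => []
  | c :: rest =>
    (if c = '\n' then
       (match rest.head? with
        | some d => if d = ' ' then ['\n'] else ['\n', '\n', '\n']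
        | none => ['\n'])
     else [c]) ++ pvF rest

-- structural single-char split: first part and the remaining parts
def pvMsp : List Char → List Char × List (List Char)
  | [] => ([], [])
  | c :: rest =>
    let r := pvMsp rest
    if c = '\n' then ([], r.1 :: r.2) else (c :: r.1, r.2)

-- separator-joining of the tail parts, B's loop at the spec level
def pvT : List (List Char) → List Char
  | [] => []
  | p :: ps =>
    (if PySem.Chars.startswith p [' '] || (decide (p = []) && decide (ps = [])) then ['\n']
     else ['\n', '\n', '\n']) ++ p ++ pvT ps

-- A's foldl over enumerate computes pvF
theorem pvA_loop (cs : List Char) : ∀ (suf : List Char) (k : Nat) (acc : List Char),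
    cs.drop k = suf →
    (PySem.List.enumerate suf (k : Int)).foldl (fun new ic =>
      let new := new ++ [ic.2]
      if ic.2 = '\n' then
        match PySem.List.pyGet? cs (ic.1 + 1) with
        | some d => if d ≠ ' ' then new ++ ['\n', '\n'] else new
        | none => new
      else new) acc = acc ++ pvF suf := by
  intro suf
  induction suf with
  | nil => intro k acc _; simp [PySem.List.enumerate_nil, pvF]
  | cons c rest ih =>
      intro k acc hdrop
      rw [PySem.List.enumerate_cons, List.foldl_cons]
      have hk1 : ((k : Int) + 1) = ((k + 1 : Nat) : Int) := by push_cast; ring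
      have hget : PySem.List.pyGet? cs ((k : Int) + 1) = rest.head? := by
        rw [hk1, PySem.List.pyGet?_natCast]
        have h2 : cs[k + 1]? = (cs.drop k)[1]? := by rw [List.getElem?_drop]
        rw [h2, hdrop]
        cases rest <;> simp
      have hdrop' : cs.drop (k + 1) = rest := by
        rw [← List.tail_drop, hdrop]; rfl
      by_cases hc : c = '\n'
      · subst hc
        cases hh : rest.head? with
        | none =>
            have hr : rest = [] := by cases rest <;> simp_all
            subst hr
            simp [hget, hh, pvF, PySem.List.enumerate_nil]
        | some d =>
            by_cases hd : d = ' '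
            · subst hd
              simp only [hget, hh, ne_eq, not_true_eq_false, ite_false]
              rw [hk1, ih (k + 1) _ hdrop']
              simp [pvF, hh]
            · simp only [hget, hh]
              rw [if_pos (by simpa using hd)]
              rw [hk1, ih (k + 1) _ hdrop']
              simp [pvF, hh, hd]
      · simp only [if_neg hc]
        rw [hk1, ih (k + 1) _ hdrop']
        simp [pvF, hc]

-- splitOn.go with enough fuel computes pvMsp
theorem pvGo (l : List Char) : ∀ (fuel : Nat) (cur : List Char) (acc : List (List Char)),
    l.length ≤ fuel →
    PySem.Chars.splitOn.go ['\n'] fuel l cur acc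
      = acc.reverse ++ (cur.reverse ++ (pvMsp l).1) :: (pvMsp l).2 := by
  induction l with
  | nil =>
      intro fuel cur acc _
      cases fuel <;> simp [PySem.Chars.splitOn.go, pvMsp]
  | cons c rest ih =>
      intro fuel cur acc hle
      cases fuel with
      | zero => simp at hle
      | succ f =>
          have hf : rest.length ≤ f := by simpa using hle
          by_cases hc : c = '\n'
          · subst hc
            rw [PySem.Chars.splitOn.go]
            simp only [List.isPrefixOf, BEq.rfl, Bool.true_and, List.length_cons, List.length_nil,
              List.drop_succ_cons, List.drop_zero, if_pos]
            rw [ih f [] (cur.reverse :: acc) hf]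
            simp [pvMsp]
          · rw [PySem.Chars.splitOn.go]
            simp only [List.isPrefixOf]
            rw [if_neg (by simp [Ne.symm hc])]
            rw [ih f (c :: cur) acc hf]
            simp [pvMsp, hc]

theorem pvSplit (cs : List Char) :
    PySem.Chars.splitOn cs ['\n'] = (pvMsp cs).1 :: (pvMsp cs).2 := by
  have := pvGo cs (cs.length + 1) [] [] (by omega)
  simpa [PySem.Chars.splitOn] using this

-- B's index loop computes pvT of thetail parts
theorem pvB_loop (h : List Char) (ts : List (List Char)) :
    ∀ (suf : List (List Char)) (m : Nat) (acc : List Char),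
    1 ≤ m → ts.drop (m - 1) = suf →
    (PySem.List.pyRange (m : Int) ((ts.length + 1 : Nat) : Int) 1).foldl (fun new j =>
      if PySem.Str.startswith (PySem.List.pyGetD ((h :: ts).map String.ofList) j "") " "
          || (PySem.List.pyGetD ((h :: ts).map String.ofList) j "" == ""
              && j == ((ts.length + 1 : Nat) : Int) - 1) then
        new ++ '\n' :: (PySem.List.pyGetD ((h :: ts).map String.ofList) j "").toList
      else
        new ++ '\n' :: '\n' :: '\n' :: (PySem.List.pyGetD ((h :: ts).map String.ofList) j "").toList)
      acc = acc ++ pvT suf := by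
  intro suf
  induction suf with
  | nil =>
      intro m acc h1 hdrop
      have hlen : ts.length ≤ m - 1 := by
        simpa [List.drop_eq_nil_iff] using hdrop
      rw [PySem.List.pyRange_one_eq_nil (by push_cast; omega)]
      simp [pvT]
  | cons p rest ih =>
      intro m acc h1 hdrop
      obtain ⟨m', rfl⟩ : ∃ m', m = m' + 1 := ⟨m - 1, by omega⟩
      simp only [Nat.add_sub_cancel] at hdrop
      have hlt : m' < ts.length := by
        have := congrArg List.length hdrop
        simp [List.length_drop] at this
        omega
      have hlen2 : m' + 1 + rest.length = ts.length := by
        have := congrArg List.length hdrop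
        simp [List.length_drop] at this
        omega
      rw [PySem.List.pyRange_one_cons (by push_cast; omega), List.foldl_cons]
      have hp : PySem.List.pyGetD ((h :: ts).map String.ofList) ((m' + 1 : Nat) : Int) ""
          = String.ofList p := by
        rw [PySem.List.pyGetD_natCast]
        have h0 : ts[m']? = some p := by
          have h2 : (ts.drop m')[0]? = some p := by rw [hdrop]; simp
          simpa [List.getElem?_drop] using h2
        have h3 : m' < ts.length := hlt
        simp [List.getD, List.getElem?_map, h0]
      have hdrop' : ts.drop (m' + 1) = rest := by
        rw [← List.tail_drop, hdrop]; rfl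
      have hcond : (PySem.Str.startswith (String.ofList p) " "
            || ((String.ofList p == "") && (((m' + 1 : Nat) : Int) == ((ts.length + 1 : Nat) : Int) - 1)))
          = (PySem.Chars.startswith p [' '] || (decide (p = []) && decide (rest = []))) := by
        have he1 : (String.ofList p == "") = decide (p = []) := by
          rcases eq_or_ne p ([] : List Char) with hp0 | hp0
          · subst hp0; rfl
          · have hne : String.ofList p ≠ "" := fun hco => hp0 (by simpa using congrArg String.toList hco)
            simp [hp0, hne]
        have he2 : (((m' + 1 : Nat) : Int) == ((ts.length + 1 : Nat) : Int) - 1) = decide (rest = []) := by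
          rcases eq_or_ne rest ([] : List (List Char)) with hr | hr
          · have hm : m' + 1 = ts.length := by simp [hr] at hlen2; omega
            simp [hr, hm]
          · have hne : ¬ (((m' + 1 : Nat) : Int) = ((ts.length + 1 : Nat) : Int) - 1) := by
              push_cast
              intro hco
              apply hr
              have hz : rest.length = 0 := by omega
              simpa using hz
            simp only [hr, decide_false]
            exact beq_eq_false_iff_ne.mpr hne
        rw [PySem.Str.startswith_eq, String.toList_ofList, he1, he2]
        rfl
      simp only [hp, hcond]
      have hcast : ((m' + 1 : Nat) : Int) + 1 = ((m' + 2 : Nat) : Int) := by push_cast; ring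
      by_cases hc : (PySem.Chars.startswith p [' '] || (decide (p = []) && decide (rest = []))) = true
      · rw [hc]
        
        rw [hcast, ih (m' + 2) _ (by omega) (by simpa using hdrop')]
        simp [pvT, hc, String.toList_ofList]
      · rw [Bool.not_eq_true] at hc
        rw [hc]
        simp only [Bool.false_eq_true, ite_false]
        rw [hcast, ih (m' + 2) _ (by omega) (by simpa using hdrop')]
        simp [pvT, hc, String.toList_ofList]

-- glueing the split back equals the char-level spec
theorem pvMsp_pvT (cs : List Char) : (pvMsp cs).1 ++ pvT (pvMsp cs).2 = pvF cs := by
  induction cs with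
  | nil => simp [pvMsp, pvT, pvF]
  | cons c rest ih =>
      by_cases hc : c = '\n'
      · subst hc
        cases rest with
        | nil => simp [pvMsp, pvT, pvF, PySem.Chars.startswith]
        | cons d rest' =>
            by_cases hd : d = ' '
            · subst hd
              simp [pvMsp, pvF] at ih ⊢
              simp [pvT, PySem.Chars.startswith, List.isPrefixOf, ih]
            · by_cases hd2 : d = '\n'
              · subst hd2
                simp [pvMsp, pvF] at ih ⊢
                simpa [pvT, PySem.Chars.startswith, List.isPrefixOf] using ih
              · simp [pvMsp, pvF, hd2] at ih ⊢
                simp [pvT, PySem.Chars.startswith, List.isPrefixOf, ih, hd, Ne.symm hd]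
      · simp only [pvMsp, pvF]
        simp [hc, ih]

theorem pvMain (old : String) :
    insert_newlines_before_top_level_bind old = insert_newlines_before_top_level_bind_alt old := by
  simp only [insert_newlines_before_top_level_bind, insert_newlines_before_top_level_bind_alt]
  have hA := pvA_loop old.toList old.toList 0 [] (by simp)
  rw [show ((0 : Nat) : Int) = (0 : Int) from rfl] at hA
  rw [hA]
  have hsplit : PySem.Str.split? old "\n"
      = some (((pvMsp old.toList).1 :: (pvMsp old.toList).2).map String.ofList) := by
    simp [PySem.Str.split?, PySem.Chars.split?, pvSplit]
  rw [hsplit, Option.getD_some]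
  have hacc : (PySem.List.pyGetD (((pvMsp old.toList).1 :: (pvMsp old.toList).2).map String.ofList)
      0 "").toList = (pvMsp old.toList).1 := by
    rw [show (0 : Int) = ((0 : Nat) : Int) from rfl, PySem.List.pyGetD_natCast]
    simp
  rw [hacc]
  simp only [List.length_map, List.length_cons]
  have hB := pvB_loop (pvMsp old.toList).1 (pvMsp old.toList).2 (pvMsp old.toList).2 1
    (pvMsp old.toList).1 (by omega) (by simp)
  rw [Nat.cast_one] at hB
  rw [hB, List.nil_append, pvMsp_pvT]

-- ===== VERDICT (by name: the statement is the Claim_ definition above) =====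
theorem insert_newlines_before_top_level_bind_spec : Claim_equal_insert_newlines_before_top_level_bind := by
  intro old _
  unfold Spec_insert_newlines_before_top_level_bind
  exact pvMain old
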